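-- pv_equiv track=rewrite | github.com/mabrax/coihuin-compress | chkcc/archive.py | add_empty_state_message
-- ===== SOURCE A (Python) =====
-- def add_empty_state_message(content: str) -> str:
--     """Add the empty state message after the table if no checkpoints remain.
--
--     Args:
--         content: The INDEX.md content
--
--     Returns:
--         Updated content with empty state message
--     """
--     lines = content.split("\n")
--     result_lines = []
--     table_separator_found = False
--
--     for i, line in enumerate(lines):
--         result_lines.append(line)
--         # Look for the table separator line (|---|---|---|)
--         if line.strip().startswith("|") and "---" in line.strip():
--             table_separator_found = True
--             # Add empty state message after the separator
--             result_lines.append("")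
--             result_lines.append("*No active checkpoints.*")
--
--     return "\n".join(result_lines)
-- ===== SOURCE B (Python) =====
-- def add_empty_state_message(content: str) -> str:
--     """Two staged passes: collect separator-line indices, then splice the
--     empty-state message in back-to-front by slice assignment."""
--     lines = content.split("\n")
--     sep_idxs = [i for i, line in enumerate(lines)
--                 if line.strip().startswith("|") and "---" in line.strip()]
--     for i in reversed(sep_idxs):
--         lines[i + 1:i + 1] = ["", "*No active checkpoints.*"]
--     return "\n".join(lines)
-- ===== Notes on version B (the rewrite author's own statement) =====
-- stated objective: alternative
-- what changed: Replaces A's single flag+accumulator pass with two staged passes: first collect the indices of table-separator lines, then splice the empty-state message into the line list back-to-front by slice assignment.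
import Mathlib
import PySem

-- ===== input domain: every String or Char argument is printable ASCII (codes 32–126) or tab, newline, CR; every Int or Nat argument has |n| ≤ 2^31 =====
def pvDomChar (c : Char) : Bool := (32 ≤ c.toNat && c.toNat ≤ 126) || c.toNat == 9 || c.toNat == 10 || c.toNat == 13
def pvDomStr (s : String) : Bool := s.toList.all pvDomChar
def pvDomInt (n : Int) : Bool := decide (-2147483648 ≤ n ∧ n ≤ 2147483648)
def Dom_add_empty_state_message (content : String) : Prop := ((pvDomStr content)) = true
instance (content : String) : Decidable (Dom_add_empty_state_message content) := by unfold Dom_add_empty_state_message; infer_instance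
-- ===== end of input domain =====

-- B replaces A's single flag+accumulator loop by two staged passes (collect separator
-- indices, then splice the message in back-to-front); objective: alternative decomposition.

-- ===== PORT A =====
-- A's loop: append each line; after a table-separator line also append "" and the message.
def aesmLoop : List String → List String → List String
  | [], acc => acc
  | line :: rest, acc =>
    let acc := acc ++ [line]
    let acc :=
      if PySem.Str.startswith (PySem.Str.strip line) "|" &&
         PySem.Str.isIn "---" (PySem.Str.strip line) then
        acc ++ ["", "*No active checkpoints.*"]
      else acc
    aesmLoop rest acc

def add_empty_state_message (content : String) : String :=
  PySem.Str.join "\n" (aesmLoop ((PySem.Str.split? content "\n").getD []) [])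

-- ===== PORT B =====
def aesmIsSep (line : String) : Bool :=
  let s := PySem.Str.strip line
  PySem.Str.startswith s "|" && PySem.Str.isIn "---" s

-- lines[i+1:i+1] = ["", msg]: exact for the nonnegative indices i produced by enumerate
-- (Python slice assignment at a nonnegative position clamps to the length, as take/drop do).
def aesmIns (ls : List String) (i : Int) : List String :=
  ls.take (i + 1).toNat ++ ["", "*No active checkpoints.*"] ++ ls.drop (i + 1).toNat

def add_empty_state_message_alt (content : String) : String :=
  let lines := (PySem.Str.split? content "\n").getD []
  let sepIdxs := ((PySem.List.enumerate lines).filter (fun p => aesmIsSep p.2)).map Prod.fst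
  PySem.Str.join "\n" (sepIdxs.reverse.foldl aesmIns lines)

-- ===== PRECONDITION & SPEC =====
def Spec_add_empty_state_message (content : String) (out : String) : Prop := out = add_empty_state_message_alt content
instance (content : String) (out : String) : Decidable (Spec_add_empty_state_message content out) := by unfold Spec_add_empty_state_message; infer_instance

-- ===== CLAIM (what is proved, stated in full; the proofs are below) =====
def Claim_equal_add_empty_state_message : Prop := ∀ (content : String), Dom_add_empty_state_message content → Spec_add_empty_state_message content (add_empty_state_message content)

-- ===== LEMMAS AND PROOFS =====
def aesmExpand (line : String) : List String :=
  if aesmIsSep line then [line, "", "*No active checkpoints.*"] else [line]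

theorem aesmLoop_eq_flatMap (ls : List String) (acc : List String) :
    aesmLoop ls acc = acc ++ ls.flatMap aesmExpand := by
  induction ls generalizing acc with
  | nil => simp [aesmLoop]
  | cons line rest ih =>
    simp only [aesmLoop, aesmExpand, aesmIsSep, List.flatMap_cons, ih]
    split_ifs with h <;> simp_all [List.append_assoc]

theorem aesmIns_cons (x : String) (ls : List String) (i : Int) (hi : 0 ≤ i) :
    aesmIns (x :: ls) (i + 1) = x :: aesmIns ls i := by
  have : (i + 1 + 1).toNat = (i + 1).toNat + 1 := by omega
  simp [aesmIns, this]

theorem aesmFold_shift (ks : List Int) (x : String) (ls : List String)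
    (h : ∀ i ∈ ks, 0 ≤ i) :
    (ks.map (· + 1)).foldl aesmIns (x :: ls) = x :: ks.foldl aesmIns ls := by
  induction ks generalizing ls with
  | nil => simp
  | cons k ks ih =>
    simp only [List.map_cons, List.foldl_cons]
    rw [aesmIns_cons x ls k (h k (by simp))]
    exact ih _ (fun i hi => h i (by simp [hi]))

theorem aesm_enumerate_shift {α : Type} (xs : List α) (s : Int) :
    PySem.List.enumerate xs (s + 1) =
      (PySem.List.enumerate xs s).map (fun p => (p.1 + 1, p.2)) := by
  induction xs generalizing s with
  | nil => simp [PySem.List.enumerate_nil]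
  | cons x xs ih => simp [PySem.List.enumerate_cons, ih]

theorem aesm_idx_nonneg (xs : List String) :
    ∀ i ∈ ((PySem.List.enumerate xs (0:Int)).filter (fun p => aesmIsSep p.2)).map Prod.fst,
      0 ≤ i := by
  intro i hi
  simp only [List.mem_map, List.mem_filter] at hi
  obtain ⟨p, ⟨hp, _⟩, rfl⟩ := hi
  rw [PySem.List.mem_enumerate_iff] at hp
  obtain ⟨k, hk, rfl⟩ := hp
  simp

theorem aesm_insert_eq_flatMap (xs : List String) :
    (((PySem.List.enumerate xs (0:Int)).filter (fun p => aesmIsSep p.2)).map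
        Prod.fst).reverse.foldl aesmIns xs = xs.flatMap aesmExpand := by
  induction xs with
  | nil => simp [PySem.List.enumerate_nil]
  | cons x xs ih =>
    have hnn := aesm_idx_nonneg xs
    rw [PySem.List.enumerate_cons]
    rw [aesm_enumerate_shift xs 0]
    set ks := ((PySem.List.enumerate xs (0:Int)).filter (fun p => aesmIsSep p.2)).map Prod.fst with hks
    have hfilter : ((PySem.List.enumerate xs (0:Int)).map (fun p => (p.1 + 1, p.2))).filter
        (fun p => aesmIsSep p.2) =
        ((PySem.List.enumerate xs (0:Int)).filter (fun p => aesmIsSep p.2)).map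
          (fun p => (p.1 + 1, p.2)) := by
      rw [List.filter_map]; rfl
    by_cases hx : aesmIsSep x
    · simp only [List.filter_cons, hx, if_pos, List.map_cons, hfilter, List.map_map]
      have hmap : (((PySem.List.enumerate xs (0:Int)).filter (fun p => aesmIsSep p.2)).map
          ((fun p : Int × String => p.1) ∘ fun p : Int × String => (p.1 + 1, p.2))) =
          ks.map (· + 1) := by
        simp [hks, List.map_map]
      simp only [hmap, List.reverse_cons]
      rw [List.foldl_append]
      have hrev : (ks.map (· + 1)).reverse = ks.reverse.map (· + 1) := by
        rw [← List.map_reverse]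
      rw [hrev, aesmFold_shift _ _ _ (fun i hi => hnn i (List.mem_reverse.mp hi)), ih]
      simp [aesmIns, aesmExpand, hx]
    · simp only [List.filter_cons, hx, Bool.false_eq_true, if_neg, not_false_iff, hfilter,
        List.map_map]
      have hmap : (((PySem.List.enumerate xs (0:Int)).filter (fun p => aesmIsSep p.2)).map
          ((fun p : Int × String => p.1) ∘ fun p : Int × String => (p.1 + 1, p.2))) =
          ks.map (· + 1) := by
        simp [hks, List.map_map]
      rw [hmap]
      rw [← List.map_reverse, aesmFold_shift _ _ _ (fun i hi => hnn i (List.mem_reverse.mp hi)), ih]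
      simp [aesmExpand, hx]

-- ===== VERDICT (by name: the statement is the Claim_ definition above) =====
theorem add_empty_state_message_spec : Claim_equal_add_empty_state_message := by
  intro content _
  unfold Spec_add_empty_state_message add_empty_state_message add_empty_state_message_alt
  rw [aesmLoop_eq_flatMap, List.nil_append]
  exact (congrArg (PySem.Str.join "\n") (aesm_insert_eq_flatMap _)).symm
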